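-- pv_equiv track=rewrite | github.com/altancabal/hotelsoffers-recommender | main.py | getBestFlight
-- ===== SOURCE A (Python) =====
-- def getBestFlight(flights):
--   best_flight = {}
--   lowest_flight_price = 5000 #Setting a maximum of $5000 for a flight
--   for flight in flights:
--     if flight["price"] < lowest_flight_price:
--       lowest_flight_price = flight["price"]
--       best_flight = flight
--
--   return best_flight
-- ===== SOURCE B (Python) =====
-- def getBestFlight(flights):
--   ordered = sorted(flights, key=lambda f: f["price"])
--   if ordered and ordered[0]["price"] < 5000:
--     return ordered[0]
--   return {}
-- ===== Notes on version B (the rewrite author's own statement) =====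
-- stated objective: alternative
-- what changed: Replaces the manual min-tracking loop with a stable sort by price followed by a single cap check on the first element (stability preserves A's first-wins tie-breaking).
import Mathlib
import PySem

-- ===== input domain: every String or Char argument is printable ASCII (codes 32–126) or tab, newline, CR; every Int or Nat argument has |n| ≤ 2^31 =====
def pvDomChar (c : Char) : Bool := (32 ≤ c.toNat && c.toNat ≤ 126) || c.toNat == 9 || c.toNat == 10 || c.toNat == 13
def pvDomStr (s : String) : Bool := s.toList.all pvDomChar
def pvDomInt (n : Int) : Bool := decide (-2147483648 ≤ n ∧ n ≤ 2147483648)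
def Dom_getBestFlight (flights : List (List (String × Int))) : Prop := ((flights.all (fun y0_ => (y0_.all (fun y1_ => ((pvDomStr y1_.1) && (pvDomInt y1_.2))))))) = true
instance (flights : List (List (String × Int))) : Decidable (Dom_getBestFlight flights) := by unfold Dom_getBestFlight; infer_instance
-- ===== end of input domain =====

-- B replaces A's min-tracking loop with a stable sort by price plus a cap check on the head (alternative decomposition, not faster); return-value equivalence only.


-- ===== PORT A =====
def getBestFlight (flights : List (List (String × Int))) : List (String × Int) :=
  (flights.foldl
    (fun (st : List (String × Int) × Int) flight =>
      match List.lookup "price" flight with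
      | some p => if p < st.2 then (flight, p) else st
      | none => st)   -- flight["price"] raises KeyError here; such inputs are excluded by Pre_
    (([] : List (String × Int)), (5000 : Int))).1

-- ===== PORT B =====
-- f["price"] as the sort key; the none branch (KeyError in Python) is outside Pre_
def pvKey (f : List (String × Int)) : Int := (List.lookup "price" f).getD 0

def getBestFlight_alt (flights : List (List (String × Int))) : List (String × Int) :=
  match PySem.List.sorted flights pvKey false with
  | [] => []
  | m :: _ => if pvKey m < 5000 then m else []

-- ===== PRECONDITION & SPEC =====
-- Pre_ excludes exactly the inputs on which A raises KeyError: a flight with no "price" key.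
def Pre_getBestFlight (flights : List (List (String × Int))) : Prop :=
  (flights.all (fun f => (List.lookup "price" f).isSome)) = true
instance (flights : List (List (String × Int))) : Decidable (Pre_getBestFlight flights) := by unfold Pre_getBestFlight; infer_instance
def pvWitness_getBestFlight : (List (List (String × Int))) := ([[("price", 100)], [("price", 42), ("to", 7)]])

def Spec_getBestFlight (flights : List (List (String × Int))) (out : List (String × Int)) : Prop := out = getBestFlight_alt flights
instance (flights : List (List (String × Int))) (out : List (String × Int)) : Decidable (Spec_getBestFlight flights out) := by unfold Spec_getBestFlight; infer_instance

-- ===== CLAIM (what is proved, stated in full; the proofs are below) =====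
def Claim_equal_getBestFlight : Prop := ∀ (flights : List (List (String × Int))), Dom_getBestFlight flights → Pre_getBestFlight flights → Spec_getBestFlight flights (getBestFlight flights)

-- ===== LEMMAS AND PROOFS =====

-- result and running-minimum read off a (stably sorted) accumulator
def pvRes (acc : List (List (String × Int))) : List (String × Int) :=
  match acc with
  | [] => []
  | h :: _ => if pvKey h < 5000 then h else []

def pvLow (acc : List (List (String × Int))) : Int :=
  match acc with
  | [] => 5000
  | h :: _ => if pvKey h < 5000 then pvKey h else 5000

def pvStepA (st : List (String × Int) × Int) (flight : List (String × Int)) : List (String × Int) × Int :=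
  match List.lookup "price" flight with
  | some p => if p < st.2 then (flight, p) else st
  | none => st

lemma pv_inv (flights : List (List (String × Int)))
    (h : ∀ f ∈ flights, (List.lookup "price" f).isSome = true) :
    ∀ (st : List (String × Int) × Int) (acc : List (List (String × Int))),
    st.1 = pvRes acc → st.2 = pvLow acc →
    (flights.foldl pvStepA st).1
      = pvRes (flights.foldl (fun acc x => PySem.List.insertBy (fun a b => decide (pvKey a < pvKey b)) x acc) acc) ∧
    (flights.foldl pvStepA st).2
      = pvLow (flights.foldl (fun acc x => PySem.List.insertBy (fun a b => decide (pvKey a < pvKey b)) x acc) acc) := by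
  induction flights with
  | nil => intro st acc h1 h2; exact ⟨h1, h2⟩
  | cons f fs ih =>
    intro st acc h1 h2
    obtain ⟨p, hp⟩ := Option.isSome_iff_exists.mp (h f (by simp))
    have hkf : pvKey f = p := by simp [pvKey, hp]
    have hfs : ∀ g ∈ fs, (List.lookup "price" g).isSome = true := fun g hg => h g (by simp [hg])
    simp only [List.foldl_cons]
    apply ih hfs <;>
    · cases acc with
      | nil =>
        simp [pvRes, pvLow] at h1 h2
        simp [pvStepA, hp, h2, PySem.List.insertBy, pvRes, pvLow, hkf]
        split_ifs <;> simp_all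
      | cons a t =>
        by_cases ha : pvKey a < 5000 <;> by_cases hfa : p < pvKey a <;>
          simp [pvRes, pvLow, ha] at h1 h2 <;>
          (try have hp5 : ¬ p < 5000 := by omega) <;>
          (try have hp5' : p < 5000 := by omega) <;>
          simp [pvStepA, hp, PySem.List.insertBy, hkf, hfa, pvRes, pvLow, h1, h2, ha] <;>
          first | rfl | omega | (intro h; omega) | (split_ifs <;> (first | rfl | omega | simp_all))

-- ===== VERDICT (by name: the statement is the Claim_ definition above) =====
theorem getBestFlight_spec : Claim_equal_getBestFlight := by
  intro flights _ hpre
  unfold Spec_getBestFlight getBestFlight getBestFlight_alt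
  have h : ∀ f ∈ flights, (List.lookup "price" f).isSome = true := by
    intro f hf
    exact (List.all_eq_true.mp hpre) f hf
  have := (pv_inv flights h (([], 5000)) [] rfl rfl).1
  rw [show (fun (st : List (String × Int) × Int) flight =>
      match List.lookup "price" flight with
      | some p => if p < st.2 then (flight, p) else st
      | none => st) = pvStepA from rfl]
  rw [this, PySem.List.sorted_eq_foldl_insertBy flights pvKey]
  cases hs : List.foldl (fun acc x => PySem.List.insertBy (fun a b => decide (pvKey a < pvKey b)) x acc) [] flights <;> simp [pvRes]
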